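-- pv_equiv track=rewrite | github.com/pko89403/ZeroAlign-Rec | src/sid_reco/taxonomy/item_projection.py | _has_cross_feature_duplicates
-- ===== SOURCE A (Python) =====
-- UNKNOWN_TAXONOMY_VALUE = "empty"
--
-- def _has_cross_feature_duplicates(taxonomy: dict[str, list[str]]) -> bool:
--     seen: set[str] = set()
--     for values in taxonomy.values():
--         for value in values:
--             if value == UNKNOWN_TAXONOMY_VALUE:
--                 continue
--             if value in seen:
--                 return True
--             seen.add(value)
--     return False
-- ===== SOURCE B (Python) =====
-- UNKNOWN_TAXONOMY_VALUE = "empty"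
--
-- def _has_cross_feature_duplicates(taxonomy: dict[str, list[str]]) -> bool:
--     flat = sorted(v for values in taxonomy.values() for v in values if v != UNKNOWN_TAXONOMY_VALUE)
--     return any(a == b for a, b in zip(flat, flat[1:]))
-- ===== Notes on version B (the rewrite author's own statement) =====
-- stated objective: alternative
-- what changed: Replaces the incremental seen-set membership loop with early return by sorting the flattened non-'empty' values and scanning once for an adjacent equal pair; no set is used at all.
import Mathlib
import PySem

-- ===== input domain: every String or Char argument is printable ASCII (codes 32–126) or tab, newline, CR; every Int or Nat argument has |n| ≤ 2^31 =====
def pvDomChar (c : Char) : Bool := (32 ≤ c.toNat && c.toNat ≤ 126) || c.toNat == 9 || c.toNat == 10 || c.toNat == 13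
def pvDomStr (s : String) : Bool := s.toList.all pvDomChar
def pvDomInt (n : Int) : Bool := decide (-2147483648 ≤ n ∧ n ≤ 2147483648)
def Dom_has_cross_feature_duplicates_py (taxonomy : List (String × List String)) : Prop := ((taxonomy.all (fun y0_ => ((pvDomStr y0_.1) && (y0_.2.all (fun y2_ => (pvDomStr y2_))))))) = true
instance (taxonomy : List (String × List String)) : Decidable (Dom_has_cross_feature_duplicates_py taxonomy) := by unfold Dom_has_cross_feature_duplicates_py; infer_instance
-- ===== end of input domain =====

-- B replaces A's incremental seen-set membership loop (early return) by sorting the flattened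
-- non-"empty" values and scanning once for an adjacent equal pair (alternative algorithm, no set).

-- ===== PORT A =====
-- inner 'for value in values' loop: none = early 'return True', some seen = loop finished
def pvAInner : List String → PySem.Set String → Option (PySem.Set String)
  | [], seen => some seen
  | v :: vs, seen =>
    if v == "empty" then pvAInner vs seen
    else if PySem.Set.contains seen v then none
    else pvAInner vs (PySem.Set.add seen v)

-- outer 'for values in taxonomy.values()' loop
def pvAOuter : List (String × List String) → PySem.Set String → Bool
  | [], _ => false
  | kv :: rest, seen =>
    match pvAInner kv.2 seen with
    | none => true
    | some s => pvAOuter rest s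

def has_cross_feature_duplicates_py (taxonomy : List (String × List String)) : Bool :=
  pvAOuter taxonomy PySem.Set.empty

-- ===== PORT B =====
def has_cross_feature_duplicates_py_alt (taxonomy : List (String × List String)) : Bool :=
  let flat := PySem.List.sorted
    (taxonomy.flatMap (fun kv => kv.2.filter (fun v => v != "empty"))) (fun x => x) false
  -- any(a == b for a, b in zip(flat, flat[1:])): flat[1:] = flat.tail (PySem.List.slice_from at 1)
  (flat.zip flat.tail).any (fun p => p.1 == p.2)

-- ===== PRECONDITION & SPEC =====
def Spec_has_cross_feature_duplicates_py (taxonomy : List (String × List String)) (out : Bool) : Prop := out = has_cross_feature_duplicates_py_alt taxonomy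
instance (taxonomy : List (String × List String)) (out : Bool) : Decidable (Spec_has_cross_feature_duplicates_py taxonomy out) := by unfold Spec_has_cross_feature_duplicates_py; infer_instance

-- ===== CLAIM (what is proved, stated in full; the proofs are below) =====
def Claim_equal_has_cross_feature_duplicates_py : Prop := ∀ (taxonomy : List (String × List String)), Dom_has_cross_feature_duplicates_py taxonomy → Spec_has_cross_feature_duplicates_py taxonomy (has_cross_feature_duplicates_py taxonomy)

-- ===== LEMMAS AND PROOFS =====

-- the flattened list of non-"empty" values (proof-side name for B's pre-sort list)
def pvFlat (taxonomy : List (String × List String)) : List String :=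
  taxonomy.flatMap (fun kv => kv.2.filter (fun v => v != "empty"))

-- plain duplicate scan over an already-flattened list (characterises A's loop)
def pvScan : List String → PySem.Set String → Option (PySem.Set String)
  | [], s => some s
  | v :: vs, s => if PySem.Set.contains s v then none else pvScan vs (PySem.Set.add s v)

theorem pvAInner_eq_scan (vs : List String) (s : PySem.Set String) :
    pvAInner vs s = pvScan (vs.filter (fun v => v != "empty")) s := by
  induction vs generalizing s with
  | nil => rfl
  | cons v vs ih =>
    by_cases h : v = "empty"
    · simp [pvAInner, h, ih]
    · simp only [pvAInner, List.filter_cons]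
      simp [pvScan, PySem.Set.contains, h, ih]

theorem pvScan_append (xs ys : List String) (s : PySem.Set String) :
    pvScan (xs ++ ys) s = (pvScan xs s).bind (pvScan ys) := by
  induction xs generalizing s with
  | nil => rfl
  | cons v vs ih =>
    simp only [List.cons_append, pvScan]
    split_ifs <;> simp [ih]

theorem pvAOuter_eq_scan (taxonomy : List (String × List String)) (s : PySem.Set String) :
    pvAOuter taxonomy s = (pvScan (pvFlat taxonomy) s).isNone := by
  induction taxonomy generalizing s with
  | nil => rfl
  | cons kv rest ih =>
    simp only [pvAOuter, pvFlat, List.flatMap_cons, pvScan_append, pvAInner_eq_scan]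
    cases h : pvScan (kv.2.filter (fun v => v != "empty")) s with
    | none => simp
    | some s' => simpa using ih s'

theorem pvScan_none_iff (xs : List String) (s : List String) (hs : s.Nodup) :
    pvScan xs s = none ↔ ¬ (s ++ xs).Nodup := by
  induction xs generalizing s with
  | nil => simp [pvScan, hs]
  | cons v vs ih =>
    simp only [pvScan]
    by_cases hv : v ∈ s
    · rw [if_pos (by simp [PySem.Set.contains, hv])]
      constructor
      · intro _ hnd
        rcases List.nodup_append.mp hnd with ⟨_, _, hdisj⟩
        exact hdisj v hv v List.mem_cons_self rfl
      · intro _; rfl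
    · rw [if_neg (by simp [PySem.Set.contains, hv])]
      have hadd : PySem.Set.add s v = s ++ [v] := by
        simp [PySem.Set.add, hv]
      have hs' : (s ++ [v]).Nodup := by
        refine List.nodup_append.mpr ⟨hs, by simp, ?_⟩
        intro a ha b hb hab
        exact hv ((hab.trans (List.mem_singleton.mp hb)) ▸ ha)
      rw [hadd, ih (s ++ [v]) hs', List.append_assoc, List.singleton_append]

-- a weakly sorted list has an adjacent equal pair iff it has duplicates at all
theorem pvAdj_iff_not_nodup (l : List String) (hl : l.Pairwise (· ≤ ·)) :
    ((l.zip l.tail).any (fun p => p.1 == p.2)) = true ↔ ¬ l.Nodup := by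
  induction l with
  | nil => simp
  | cons a t ih =>
    cases t with
    | nil => simp
    | cons b t' =>
      have hbt : (b :: t').Pairwise (· ≤ ·) := hl.tail
      have hab : a ≤ b := (List.pairwise_cons.mp hl).1 b List.mem_cons_self
      simp only [List.tail_cons, List.zip_cons_cons, List.any_cons]
      by_cases heq : a = b
      · constructor
        · intro _ hnd
          exact (List.pairwise_cons.mp hnd).1 b List.mem_cons_self heq
        · intro _; simp [heq]
      · have ha_not : a ∉ b :: t' := by
          intro hmem
          rcases List.mem_cons.mp hmem with h | h
          · exact heq h
          · have hbx : b ≤ a := (List.pairwise_cons.mp hbt).1 a h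
            exact heq (le_antisymm hab hbx)
        rw [show (a == b) = false from by simp [heq], Bool.false_or]
        have ih' := ih hbt
        simp only [List.tail_cons] at ih'
        rw [ih']
        constructor
        · intro h hnd; exact h hnd.tail
        · intro h hnd; exact h (List.nodup_cons.mpr ⟨ha_not, hnd⟩)

-- ===== VERDICT (by name: the statement is the Claim_ definition above) =====
theorem has_cross_feature_duplicates_py_spec : Claim_equal_has_cross_feature_duplicates_py := by
  intro taxonomy _
  unfold Spec_has_cross_feature_duplicates_py
  unfold has_cross_feature_duplicates_py has_cross_feature_duplicates_py_alt
  rw [show PySem.Set.empty = ([] : List String) from rfl, pvAOuter_eq_scan]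
  have hflat : taxonomy.flatMap (fun kv => kv.2.filter (fun v => v != "empty")) = pvFlat taxonomy := rfl
  simp only [hflat]
  set srt := PySem.List.sorted (pvFlat taxonomy) (fun x => x) false with hsrt
  have hpw : srt.Pairwise (· ≤ ·) := by
    simpa using PySem.List.sorted_pairwise (pvFlat taxonomy) (fun x => x)
  have hperm : srt.Perm (pvFlat taxonomy) := PySem.List.sorted_perm _ _ _
  have hnd_iff : srt.Nodup ↔ (pvFlat taxonomy).Nodup := hperm.nodup_iff
  by_cases hnd : (pvFlat taxonomy).Nodup
  · have h1 : pvScan (pvFlat taxonomy) [] ≠ none := by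
      rw [Ne, pvScan_none_iff _ [] List.nodup_nil]
      simpa using hnd
    have h2 : ((srt.zip srt.tail).any (fun p => p.1 == p.2)) = false := by
      rw [Bool.eq_false_iff, Ne, pvAdj_iff_not_nodup srt hpw]
      simp [hnd_iff.mpr hnd]
    cases hsc : pvScan (pvFlat taxonomy) [] with
    | none => exact absurd hsc h1
    | some s => simp [h2]
  · have h1 : pvScan (pvFlat taxonomy) [] = none := by
      rw [pvScan_none_iff _ [] List.nodup_nil]
      simpa using hnd
    have h2 : ((srt.zip srt.tail).any (fun p => p.1 == p.2)) = true := by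
      rw [pvAdj_iff_not_nodup srt hpw, hnd_iff]
      exact hnd
    simp [h1, h2]
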